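-- pv_equiv track=rewrite | github.com/aaronmtir/3110-Project | appFinal.py | map_lines
-- ===== SOURCE A (Python) =====
-- def map_lines(original_lines, new_lines):
--     """
--     Compute a mapping between original_lines and new_lines using LCS.
--
--     Returns a list of (orig_line_number, new_line_number) pairs where:
--       - Both numbers are 1-based.
--       - (i, j)  means original line i corresponds to new line j (unchanged/moved).
--       - (i, -1) means original line i was removed.
--       - (-1, j) means new line j was added.
--
--     This allows:
--       <LOCATION ORIG="7" NEW="-1"/>   for deletions
--       <LOCATION ORIG="-1" NEW="5"/>   for insertions
--     """
--     n = len(original_lines)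
--     m = len(new_lines)
--
--     # Build LCS DP table on normalized lines
--     dp = [[0] * (m + 1) for _ in range(n + 1)]
--     for i in range(n):
--         oi = original_lines[i]
--         for j in range(m):
--             if oi == new_lines[j]:
--                 dp[i + 1][j + 1] = dp[i][j] + 1
--             else:
--                 dp[i + 1][j + 1] = max(dp[i][j + 1], dp[i + 1][j])
--
--     # Backtrack to find operations: match / insert / delete
--     ops = []
--     i, j = n, m
--     while i > 0 or j > 0:
--         if i > 0 and j > 0 and original_lines[i - 1] == new_lines[j - 1]:
--             # lines match
--             ops.append(("match", i, j))
--             i -= 1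
--             j -= 1
--         elif j > 0 and (i == 0 or dp[i][j - 1] >= dp[i - 1][j]):
--             # insertion in new file
--             ops.append(("ins", -1, j))
--             j -= 1
--         else:
--             # deletion from original file
--             ops.append(("del", i, -1))
--             i -= 1
--
--     ops.reverse()
--
--     # Convert ops to list of (orig_line_number, new_line_number)
--     mappings = []
--     for kind, oi, nj in ops:
--         if kind == "match":
--             mappings.append((oi, nj))
--         elif kind == "del":
--             mappings.append((oi, -1))
--         else:  # "ins"
--             mappings.append((-1, nj))
--
--     return mappings
-- ===== SOURCE B (Python) =====
-- def map_lines(original_lines, new_lines):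
--     """LCS line mapping: same dp table, but backtrack collects only the matched
--     index pairs; the output is then assembled by a forward two-pointer walk."""
--     n = len(original_lines)
--     m = len(new_lines)
--
--     dp = [[0] * (m + 1) for _ in range(n + 1)]
--     for i in range(n):
--         oi = original_lines[i]
--         for j in range(m):
--             if oi == new_lines[j]:
--                 dp[i + 1][j + 1] = dp[i][j] + 1
--             else:
--                 dp[i + 1][j + 1] = max(dp[i][j + 1], dp[i + 1][j])
--
--     # Backtrack collecting only the matched (1-based) pairs.
--     matches = []
--     i, j = n, m
--     while i > 0 or j > 0:
--         if i > 0 and j > 0 and original_lines[i - 1] == new_lines[j - 1]: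
--             matches.append((i, j))
--             i -= 1
--             j -= 1
--         elif j > 0 and (i == 0 or dp[i][j - 1] >= dp[i - 1][j]):
--             j -= 1
--         else:
--             i -= 1
--     matches.reverse()
--
--     # Forward two-pointer assembly: between matches, deletions then insertions.
--     mappings = []
--     oi, nj = 1, 1
--     for (a, b) in matches:
--         for k in range(oi, a):
--             mappings.append((k, -1))
--         for k in range(nj, b):
--             mappings.append((-1, k))
--         mappings.append((a, b))
--         oi, nj = a + 1, b + 1
--     for k in range(oi, n + 1):
--         mappings.append((k, -1))
--     for k in range(nj, m + 1):
--         mappings.append((-1, k))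
--     return mappings
-- ===== Notes on version B (the rewrite author's own statement) =====
-- stated objective: alternative
-- what changed: B keeps the same LCS dp table and backtrack tie-break but collects only the matched index pairs and assembles the diff with a forward two-pointer walk over both line lists (deletions then insertions in each gap), replacing A's ops-list backtrack + reverse + conversion pass.
import Mathlib
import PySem

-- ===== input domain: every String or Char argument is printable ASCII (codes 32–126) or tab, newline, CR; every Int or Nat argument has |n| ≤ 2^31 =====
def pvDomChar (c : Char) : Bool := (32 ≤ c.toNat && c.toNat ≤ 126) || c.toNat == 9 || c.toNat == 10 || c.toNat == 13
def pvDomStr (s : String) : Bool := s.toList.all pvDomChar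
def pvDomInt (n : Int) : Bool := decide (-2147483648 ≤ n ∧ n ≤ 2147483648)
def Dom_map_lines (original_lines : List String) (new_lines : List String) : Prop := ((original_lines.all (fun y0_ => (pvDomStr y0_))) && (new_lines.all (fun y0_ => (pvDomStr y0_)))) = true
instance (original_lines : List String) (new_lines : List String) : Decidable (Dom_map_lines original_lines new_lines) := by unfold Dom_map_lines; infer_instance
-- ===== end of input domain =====

-- B re-implements the assembly: the same LCS dp table and tie-break select the matched
-- pairs, but the diff lines are produced by a forward two-pointer walk over both lists
-- instead of A's ops-list backtrack + reverse + conversion pass (objective: alternative).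

-- ===== PORT A =====
-- Both Pythons build the identical dp table with the identical nested loops, so the
-- table builder is a shared helper.  A row is built left to right: `c` is the value
-- just written at the previous column (dp[i+1][j]), `prev` is the tail of row i
-- aligned so its first two elements are dp[i][j] and dp[i][j+1].
def lcsRowAux (line : String) : List String → List Int → Int → List Int
  | nl :: ns', p0 :: p1 :: pr, c =>
      (if line == nl then p0 + 1 else max p1 c) :: lcsRowAux line ns' (p1 :: pr) (if line == nl then p0 + 1 else max p1 c)
  | _, _, _ => []

def lcsRow (line : String) (ns : List String) (prev : List Int) : List Int :=
  0 :: lcsRowAux line ns prev 0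

def lcsRows : List String → List String → List Int → List (List Int)
  | [], _, prev => [prev]
  | line :: os', ns, prev => prev :: lcsRows os' ns (lcsRow line ns prev)

def lcsTable (os ns : List String) : List (List Int) :=
  lcsRows os ns (List.replicate (ns.length + 1) 0)

-- dp[i][j]; indices are always in range where the backtracks read the table.
def dget (t : List (List Int)) (i j : Nat) : Int := (t.getD i []).getD j 0

-- the two branch conditions of the (identical) backtrack loops
def matchC (os ns : List String) (i j : Nat) : Bool :=
  (i != 0) && (j != 0) && (os.getD (i - 1) "" == ns.getD (j - 1) "")

def insC (t : List (List Int)) (i j : Nat) : Bool :=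
  (j != 0) && ((i == 0) || decide (dget t (i - 1) j ≤ dget t i (j - 1)))

-- A's backtrack: the ops list in append order (chronological, from (n,m) down).
-- `fuel` (called with i + j, which strictly decreases each step) only makes the
-- while-loop's structural recursion evident; the 0 case is never reached.
def backA (os ns : List String) (t : List (List Int)) : Nat → Nat → Nat → List (String × Int × Int)
  | 0, _, _ => []
  | fuel + 1, i, j =>
    if i = 0 ∧ j = 0 then []
    else if matchC os ns i j then ("match", (i : Int), (j : Int)) :: backA os ns t fuel (i - 1) (j - 1)
    else if insC t i j then ("ins", -1, (j : Int)) :: backA os ns t fuel i (j - 1)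
    else ("del", (i : Int), -1) :: backA os ns t fuel (i - 1) j

-- A's final conversion pass over the reversed ops
def convert : List (String × Int × Int) → List (Int × Int)
  | [] => []
  | (kind, oi, nj) :: rest =>
      (if kind == "match" then (oi, nj) else if kind == "del" then (oi, -1) else (-1, nj)) :: convert rest

def map_lines (original_lines : List String) (new_lines : List String) : List (Int × Int) :=
  let t := lcsTable original_lines new_lines
  convert ((backA original_lines new_lines t
    (original_lines.length + new_lines.length) original_lines.length new_lines.length).reverse)

-- ===== PORT B =====
-- B's backtrack keeps only the matched (1-based) index pairs (in decreasing order);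
-- same fuel guard as backA.
def backB (os ns : List String) (t : List (List Int)) : Nat → Nat → Nat → List (Nat × Nat)
  | 0, _, _ => []
  | fuel + 1, i, j =>
    if i = 0 ∧ j = 0 then []
    else if matchC os ns i j then (i, j) :: backB os ns t fuel (i - 1) (j - 1)
    else if insC t i j then backB os ns t fuel i (j - 1)
    else backB os ns t fuel (i - 1) j

-- (k, -1) for k in range(a, b) — pending deletions
def delRange (a b : Nat) : List (Int × Int) := (List.range' a (b - a)).map (fun k : Nat => ((k : Int), -1))

-- (-1, k) for k in range(a, b) — pending insertions
def insRange (a b : Nat) : List (Int × Int) := (List.range' a (b - a)).map (fun k : Nat => (-1, (k : Int)))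

-- forward two-pointer assembly over the increasing match list; (bi, bj) are the
-- list lengths (n, m) used by the final flush, (oi, nj) the 1-based cursors
def emitAux (bi bj : Nat) : List (Nat × Nat) → Nat → Nat → List (Int × Int)
  | [], oi, nj => delRange oi (bi + 1) ++ insRange nj (bj + 1)
  | (a, b) :: rest, oi, nj =>
      delRange oi a ++ insRange nj b ++ (((a : Int), (b : Int)) :: emitAux bi bj rest (a + 1) (b + 1))

def map_lines_alt (original_lines : List String) (new_lines : List String) : List (Int × Int) :=
  let t := lcsTable original_lines new_lines
  emitAux original_lines.length new_lines.length
    ((backB original_lines new_lines t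
      (original_lines.length + new_lines.length) original_lines.length new_lines.length).reverse) 1 1

-- ===== PRECONDITION & SPEC =====
def Spec_map_lines (original_lines : List String) (new_lines : List String) (out : List (Int × Int)) : Prop := out = map_lines_alt original_lines new_lines
instance (original_lines : List String) (new_lines : List String) (out : List (Int × Int)) : Decidable (Spec_map_lines original_lines new_lines out) := by unfold Spec_map_lines; infer_instance

-- ===== CLAIM (what is proved, stated in full; the proofs are below) =====
def Claim_equal_map_lines : Prop := ∀ (original_lines : List String) (new_lines : List String), Dom_map_lines original_lines new_lines → Spec_map_lines original_lines new_lines (map_lines original_lines new_lines)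

-- ===== LEMMAS AND PROOFS =====

theorem lcsRowAux_length (line : String) : ∀ (ns : List String) (prev : List Int) (c : Int),
    ns.length + 1 ≤ prev.length → (lcsRowAux line ns prev c).length = ns.length := by
  intro ns
  induction ns with
  | nil => intro prev c _; simp [lcsRowAux]
  | cons nl ns' ih =>
    intro prev c h
    match prev, h with
    | p0 :: p1 :: pr, h =>
      simp only [lcsRowAux, List.length_cons]
      rw [ih (p1 :: pr) _ (by simpa using h)]

theorem lcsRow_length (line : String) (ns : List String) (prev : List Int)
    (h : prev.length = ns.length + 1) : (lcsRow line ns prev).length = ns.length + 1 := by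
  simp [lcsRow, lcsRowAux_length line ns prev 0 (by omega)]

-- value characterization of a row: entry j of the aux row
theorem lcsRowAux_getD (line : String) : ∀ (j : Nat) (ns : List String) (prev : List Int) (c : Int),
    j < ns.length → ns.length + 1 ≤ prev.length →
    (lcsRowAux line ns prev c).getD j 0 =
      if line == ns.getD j "" then prev.getD j 0 + 1
      else max (prev.getD (j + 1) 0)
        (if j = 0 then c else (lcsRowAux line ns prev c).getD (j - 1) 0) := by
  intro j
  induction j with
  | zero =>
    intro ns prev c hj hp
    match ns, prev, hp with
    | nl :: ns', p0 :: p1 :: pr, _ => simp [lcsRowAux]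
  | succ j' ih =>
    intro ns prev c hj hp
    match ns, prev, hp with
    | nl :: ns', p0 :: p1 :: pr, hp =>
      have hj' : j' < ns'.length := by simpa using hj
      have hp' : ns'.length + 1 ≤ (p1 :: pr).length := by simpa using hp
      have := ih ns' (p1 :: pr) (if line == nl then p0 + 1 else max p1 c) hj' hp'
      simp only [lcsRowAux, List.getD_cons_succ]
      rw [this]
      cases j' with
      | zero => simp
      | succ j'' => simp

theorem lcsRows_getD_zero (ns : List String) : ∀ (os : List String) (prev : List Int),
    (lcsRows os ns prev).getD 0 [] = prev := by
  intro os prev; cases os <;> simp [lcsRows]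

theorem lcsRows_length (ns : List String) : ∀ (os : List String) (prev : List Int),
    (lcsRows os ns prev).length = os.length + 1 := by
  intro os
  induction os with
  | nil => intro prev; simp [lcsRows]
  | cons o os' ih => intro prev; simp [lcsRows, ih]

theorem lcsRows_getD_succ (ns : List String) : ∀ (os : List String) (prev : List Int) (i : Nat),
    i < os.length →
    (lcsRows os ns prev).getD (i + 1) [] =
      lcsRow (os.getD i "") ns ((lcsRows os ns prev).getD i []) := by
  intro os
  induction os with
  | nil => intro prev i h; simp at h
  | cons o os' ih =>
    intro prev i h
    cases i with
    | zero =>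
      have h0 := lcsRows_getD_zero ns os' (lcsRow o ns prev)
      simp only [lcsRows, List.getD_cons_succ, List.getD_cons_zero, List.getD] at *
      simpa using h0
    | succ i' =>
      have := ih (lcsRow o ns prev) i' (by simpa using h)
      simpa [lcsRows] using this

theorem lcsRows_row_length (ns : List String) : ∀ (os : List String) (prev : List Int),
    prev.length = ns.length + 1 → ∀ i, i ≤ os.length →
    ((lcsRows os ns prev).getD i []).length = ns.length + 1 := by
  intro os
  induction os with
  | nil =>
    intro prev h i hi
    have : i = 0 := by simpa using hi
    subst this
    simpa [lcsRows]
  | cons o os' ih =>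
    intro prev h i hi
    cases i with
    | zero => simpa [lcsRows]
    | succ i' =>
      have := ih (lcsRow o ns prev) (lcsRow_length o ns prev h) i' (by simpa using hi)
      simpa [lcsRows] using this

theorem table_row_length (os ns : List String) (i : Nat) (h : i ≤ os.length) :
    ((lcsTable os ns).getD i []).length = ns.length + 1 := by
  exact lcsRows_row_length ns os _ (by simp) i h

theorem dget_zero_row (os ns : List String) (j : Nat) : dget (lcsTable os ns) 0 j = 0 := by
  unfold dget lcsTable
  rw [lcsRows_getD_zero]
  rcases lt_or_ge j (ns.length + 1) with h | h
  · simp [List.getD, List.getElem?_replicate, h]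
  · rw [List.getD_eq_default]
    simpa using h

theorem dget_zero_col (os ns : List String) (i : Nat) : dget (lcsTable os ns) i 0 = 0 := by
  cases i with
  | zero => exact dget_zero_row os ns 0
  | succ i' =>
    unfold dget
    rcases lt_or_ge i' os.length with h | h
    · unfold lcsTable
      rw [lcsRows_getD_succ ns os _ i' h]
      simp [lcsRow]
    · have hlen : (lcsTable os ns).length ≤ i' + 1 := by
        rw [lcsTable, lcsRows_length]; omega
      rw [List.getD_eq_default _ [] hlen]
      simp

theorem dget_rec (os ns : List String) (i j : Nat) (hi : i < os.length) (hj : j < ns.length) :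
    dget (lcsTable os ns) (i + 1) (j + 1) =
      if os.getD i "" == ns.getD j "" then dget (lcsTable os ns) i j + 1
      else max (dget (lcsTable os ns) i (j + 1)) (dget (lcsTable os ns) (i + 1) j) := by
  have hrow : (lcsTable os ns).getD (i + 1) [] =
      lcsRow (os.getD i "") ns ((lcsTable os ns).getD i []) := by
    unfold lcsTable
    exact lcsRows_getD_succ ns os _ i hi
  have hlen : ((lcsTable os ns).getD i []).length = ns.length + 1 :=
    table_row_length os ns i (by omega)
  unfold dget
  rw [hrow]
  simp only [lcsRow, List.getD_cons_succ]
  rw [lcsRowAux_getD (os.getD i "") j ns _ 0 hj (by omega)]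
  cases j with
  | zero =>
    have h0 : dget (lcsTable os ns) (i + 1) 0 = 0 := dget_zero_col os ns (i + 1)
    unfold dget at h0
    rw [hrow] at h0
    simp [h0]
  | succ j'' =>
    simp only [if_neg (Nat.succ_ne_zero j''), Nat.add_sub_cancel]
    rfl

theorem getD_int_nonneg (l : List Int) (h : ∀ x ∈ l, 0 ≤ x) (j : Nat) : 0 ≤ l.getD j 0 := by
  rcases lt_or_ge j l.length with hj | hj
  · rw [List.getD_eq_getElem l 0 hj]
    exact h _ (List.getElem_mem hj)
  · rw [List.getD_eq_default l 0 hj]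

theorem lcsRowAux_nonneg (line : String) : ∀ (ns : List String) (prev : List Int) (c : Int),
    (∀ x ∈ prev, 0 ≤ x) → 0 ≤ c → ∀ x ∈ lcsRowAux line ns prev c, 0 ≤ x := by
  intro ns
  induction ns with
  | nil => intro prev c _ _ x hx; simp [lcsRowAux] at hx
  | cons nl ns' ih =>
    intro prev c hp hc x hx
    match prev with
    | [] => simp [lcsRowAux] at hx
    | [p0] => simp [lcsRowAux] at hx
    | p0 :: p1 :: pr =>
      simp only [lcsRowAux, List.mem_cons] at hx
      have hv : 0 ≤ if line == nl then p0 + 1 else max p1 c := by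
        have h0 : 0 ≤ p0 := hp p0 (by simp)
        have h1 : 0 ≤ p1 := hp p1 (by simp)
        split <;> [omega; exact le_max_of_le_right hc]
      rcases hx with rfl | hx
      · exact hv
      · exact ih (p1 :: pr) _ (fun y hy => hp y (List.mem_cons_of_mem _ hy)) hv x hx

theorem lcsRows_nonneg (ns : List String) : ∀ (os : List String) (prev : List Int),
    (∀ x ∈ prev, 0 ≤ x) → ∀ r ∈ lcsRows os ns prev, ∀ x ∈ r, 0 ≤ x := by
  intro os
  induction os with
  | nil =>
    intro prev hp r hr x hx
    simp only [lcsRows, List.mem_singleton] at hr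
    subst hr; exact hp x hx
  | cons o os' ih =>
    intro prev hp r hr x hx
    simp only [lcsRows, List.mem_cons] at hr
    rcases hr with rfl | hr
    · exact hp x hx
    · refine ih (lcsRow o ns prev) ?_ r hr x hx
      intro y hy
      simp only [lcsRow, List.mem_cons] at hy
      rcases hy with rfl | hy
      · exact le_rfl
      · exact lcsRowAux_nonneg o ns prev 0 hp le_rfl y hy

theorem dget_nonneg (os ns : List String) (i j : Nat) : 0 ≤ dget (lcsTable os ns) i j := by
  unfold dget
  apply getD_int_nonneg
  intro x hx
  rcases lt_or_ge i (lcsTable os ns).length with hi | hi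
  · have hmem : (lcsTable os ns).getD i [] ∈ lcsTable os ns := by
      rw [List.getD_eq_getElem _ [] hi]
      exact List.getElem_mem hi
    exact lcsRows_nonneg ns os _ (by simp) _ hmem x hx
  · rw [List.getD_eq_default _ [] hi] at hx
    simp at hx

-- dp grows by at most 1 along a row, and is monotone from row to row
theorem dget_grind (os ns : List String) : ∀ i, i ≤ os.length →
    (∀ j, j + 1 ≤ ns.length → dget (lcsTable os ns) i (j + 1) ≤ dget (lcsTable os ns) i j + 1) ∧
    (∀ i', i' + 1 = i → ∀ j, j ≤ ns.length → dget (lcsTable os ns) i' j ≤ dget (lcsTable os ns) i j) := by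
  intro i
  induction i with
  | zero =>
    intro _
    refine ⟨fun j hj => ?_, fun i' h => by omega⟩
    rw [dget_zero_row, dget_zero_row]; omega
  | succ i ih =>
    intro hi
    have IH := ih (by omega)
    have mono : ∀ j, j ≤ ns.length → dget (lcsTable os ns) i j ≤ dget (lcsTable os ns) (i + 1) j := by
      intro j
      induction j with
      | zero => intro _; rw [dget_zero_col, dget_zero_col]
      | succ j ihj =>
        intro hj
        rw [dget_rec os ns i j (by omega) (by omega)]
        split
        · have := IH.1 j (by omega); omega
        · exact le_max_left _ _
    refine ⟨fun j hj => ?_, fun i' h j hj => ?_⟩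
    · rw [dget_rec os ns i j (by omega) (by omega)]
      split
      · have := mono j (by omega); omega
      · apply max_le
        · have h1 := IH.1 j (by omega)
          have h2 := mono j (by omega)
          omega
        · omega
    · have : i' = i := by omega
      subst this
      exact mono j hj

-- once the backtrack takes a deletion, the step above it cannot be an insertion
theorem dget_gap (os ns : List String) (i j : Nat) (h2i : 2 ≤ i) (hi : i ≤ os.length)
    (h1j : 1 ≤ j) (hj : j ≤ ns.length)
    (hne : (os.getD (i - 2) "" == ns.getD (j - 1) "") = false)
    (hlt : dget (lcsTable os ns) i (j - 1) < dget (lcsTable os ns) (i - 1) j) :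
    dget (lcsTable os ns) (i - 1) (j - 1) < dget (lcsTable os ns) (i - 2) j := by
  obtain ⟨a, rfl⟩ : ∃ a, i = a + 2 := ⟨i - 2, by omega⟩
  obtain ⟨b, rfl⟩ : ∃ b, j = b + 1 := ⟨j - 1, by omega⟩
  simp only [Nat.add_sub_cancel, show a + 2 - 1 = a + 1 by omega] at *
  have hrec := dget_rec os ns a b (by omega) (by omega)
  rw [hne] at hrec
  simp only [Bool.false_eq_true, if_false] at hrec
  have hmono : dget (lcsTable os ns) (a + 1) b ≤ dget (lcsTable os ns) (a + 2) b :=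
    (dget_grind os ns (a + 2) hi).2 (a + 1) rfl b (by omega)
  have hlt2 : dget (lcsTable os ns) (a + 1) b <
      max (dget (lcsTable os ns) a (b + 1)) (dget (lcsTable os ns) (a + 1) b) := by
    rw [← hrec]; omega
  rcases lt_max_iff.mp hlt2 with h | h
  · exact h
  · omega

theorem backB_zero (os ns : List String) (t : List (List Int)) :
    ∀ k i, backB os ns t k i 0 = [] := by
  intro k
  induction k with
  | zero => intro i; rfl
  | succ k ih => intro i; rw [backB]; simp [matchC, insC, ih]

theorem backB_bounds (os ns : List String) (t : List (List Int)) :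
    ∀ k i j p, p ∈ backB os ns t k i j → p.1 ≤ i ∧ p.2 ≤ j := by
  intro k
  induction k with
  | zero =>
    intro i j p hp
    simp [backB] at hp
  | succ k ih =>
    intro i j p hp
    rw [backB] at hp
    split_ifs at hp with h0 h1 h2
    · simp at hp
    · have hij : i ≠ 0 ∧ j ≠ 0 := by
        simp only [matchC, Bool.and_eq_true, bne_iff_ne, ne_eq] at h1
        exact ⟨h1.1.1, h1.1.2⟩
      rcases List.mem_cons.mp hp with rfl | hp
      · exact ⟨le_rfl, le_rfl⟩
      · have := ih (i - 1) (j - 1) p hp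
        omega
    · have hj : j ≠ 0 := by
        simp only [insC, Bool.and_eq_true, bne_iff_ne, ne_eq] at h2
        exact h2.1
      have := ih i (j - 1) p hp
      omega
    · have hi : i ≠ 0 := by
        intro hi0
        have hj : j ≠ 0 := fun hj0 => h0 ⟨hi0, hj0⟩
        exact h2 (by simp [insC, hi0, hj])
      have := ih (i - 1) j p hp
      omega

-- after a deletion at (i, j) with j ≥ 1, the rest of the backtrack matches column j
theorem backB_head_after_del (os ns : List String) :
    ∀ i k j, i - 1 + j ≤ k → i ≤ os.length → j ≤ ns.length → 1 ≤ j →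
    matchC os ns i j = false → insC (lcsTable os ns) i j = false →
    ∃ c rest, backB os ns (lcsTable os ns) k (i - 1) j = (c, j) :: rest := by
  intro i
  induction i using Nat.strong_induction_on with
  | _ i IH =>
    intro k j hk hi hj h1j hm hins
    have hins' : i ≠ 0 ∧
        dget (lcsTable os ns) i (j - 1) < dget (lcsTable os ns) (i - 1) j := by
      simp only [insC, Bool.and_eq_false_iff, Bool.or_eq_false_iff, bne_eq_false_iff_eq,
        beq_eq_false_iff_ne, ne_eq, decide_eq_false_iff_not, not_le] at hins
      rcases hins with h | h
      · omega
      · exact ⟨h.1, h.2⟩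
    have hi2 : 2 ≤ i := by
      by_contra hlt
      have h1 : i = 1 := by omega
      subst h1
      have h0 := dget_zero_row os ns j
      have hnn := dget_nonneg os ns 1 (j - 1)
      have := hins'.2
      simp only [Nat.sub_self] at this
      omega
    obtain ⟨k', rfl⟩ : ∃ k', k = k' + 1 := ⟨k - 1, by omega⟩
    by_cases hm1 : matchC os ns (i - 1) j = true
    · refine ⟨i - 1, backB os ns (lcsTable os ns) k' (i - 1 - 1) (j - 1), ?_⟩
      rw [backB]
      simp only [hm1, if_true]
      rw [if_neg (by omega)]
    · have hm1' : ¬((i - 1 ≠ 0 ∧ j ≠ 0) ∧ (os.getD (i - 1 - 1) "" == ns.getD (j - 1) "") = true) := by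
        simpa [matchC, Bool.and_eq_true, bne_iff_ne] using hm1
      have hne : (os.getD (i - 2) "" == ns.getD (j - 1) "") = false := by
        cases hb : (os.getD (i - 2) "" == ns.getD (j - 1) "") with
        | false => rfl
        | true =>
          exact absurd (⟨⟨by omega, by omega⟩, by rwa [show i - 1 - 1 = i - 2 by omega]⟩ :
            (i - 1 ≠ 0 ∧ j ≠ 0) ∧ (os.getD (i - 1 - 1) "" == ns.getD (j - 1) "") = true) hm1'
      have hgap := dget_gap os ns i j hi2 hi h1j hj hne hins'.2
      have hins1 : insC (lcsTable os ns) (i - 1) j = false := by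
        simp only [insC, Bool.and_eq_false_iff, Bool.or_eq_false_iff, bne_eq_false_iff_eq,
          beq_eq_false_iff_ne, ne_eq, decide_eq_false_iff_not, not_le]
        right
        have h12 : i - 1 - 1 = i - 2 := by omega
        exact ⟨by omega, by rw [h12]; exact hgap⟩
      have hstep : backB os ns (lcsTable os ns) (k' + 1) (i - 1) j =
          backB os ns (lcsTable os ns) k' (i - 1 - 1) j := by
        rw [backB]
        rw [if_neg (by omega), if_neg (by simp [hm1]), if_neg (by simp [hins1])]
      rw [hstep]
      exact IH (i - 1) (by omega) k' j (by omega) (by omega) hj h1j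
        (by simpa using hm1) hins1

theorem convert_append (xs ys : List (String × Int × Int)) :
    convert (xs ++ ys) = convert xs ++ convert ys := by
  induction xs with
  | nil => simp [convert]
  | cons x xs ih =>
    obtain ⟨k, a, b⟩ := x
    simp [convert, ih]

theorem delRange_concat (a b : Nat) (h : a ≤ b) :
    delRange a (b + 1) = delRange a b ++ [((b : Int), -1)] := by
  unfold delRange
  rw [show b + 1 - a = (b - a) + 1 by omega, List.range'_concat, List.map_append]
  simp
  push_cast [show a + 1 * (b - a) = b by omega]
  omega

theorem insRange_concat (a b : Nat) (h : a ≤ b) :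
    insRange a (b + 1) = insRange a b ++ [(-1, (b : Int))] := by
  unfold insRange
  rw [show b + 1 - a = (b - a) + 1 by omega, List.range'_concat, List.map_append]
  simp
  push_cast [show a + 1 * (b - a) = b by omega]
  omega

theorem delRange_nil (a b : Nat) (h : b ≤ a) : delRange a b = [] := by
  unfold delRange
  rw [show b - a = 0 by omega]
  simp

theorem insRange_nil (a b : Nat) (h : b ≤ a) : insRange a b = [] := by
  unfold insRange
  rw [show b - a = 0 by omega]
  simp

-- the final value of the new-side cursor after consuming the matches
def lastNj : Nat → List (Nat × Nat) → Nat
  | nj, [] => nj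
  | _, p :: rest => lastNj (p.2 + 1) rest

-- the final value of the original-side cursor after consuming the matches
def lastOi : Nat → List (Nat × Nat) → Nat
  | oi, [] => oi
  | _, p :: rest => lastOi (p.1 + 1) rest

theorem lastNj_le : ∀ (ms : List (Nat × Nat)) (nj c : Nat), nj ≤ c →
    (∀ p ∈ ms, p.2 < c) → lastNj nj ms ≤ c := by
  intro ms
  induction ms with
  | nil => intro nj c h _; simpa [lastNj] using h
  | cons p rest ih =>
    intro nj c h hm
    simp only [lastNj]
    exact ih (p.2 + 1) c (hm p (by simp)) (fun q hq => hm q (by simp [hq]))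

theorem lastOi_le : ∀ (ms : List (Nat × Nat)) (oi c : Nat), oi ≤ c →
    (∀ p ∈ ms, p.1 < c) → lastOi oi ms ≤ c := by
  intro ms
  induction ms with
  | nil => intro oi c h _; simpa [lastOi] using h
  | cons p rest ih =>
    intro oi c h hm
    simp only [lastOi]
    exact ih (p.1 + 1) c (hm p (by simp)) (fun q hq => hm q (by simp [hq]))

theorem lastNj_concat : ∀ (ms : List (Nat × Nat)) (nj c d : Nat),
    lastNj nj (ms ++ [(c, d)]) = d + 1 := by
  intro ms
  induction ms with
  | nil => intro nj c d; simp [lastNj]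
  | cons p rest ih => intro nj c d; simp [lastNj, ih]

theorem emit_match (a b : Nat) (ha : 1 ≤ a) (hb : 1 ≤ b) :
    ∀ (ms : List (Nat × Nat)) (oi nj : Nat),
    emitAux a b (ms ++ [(a, b)]) oi nj =
      emitAux (a - 1) (b - 1) ms oi nj ++ [((a : Int), (b : Int))] := by
  intro ms
  induction ms with
  | nil =>
    intro oi nj
    simp only [List.nil_append, emitAux]
    rw [delRange_nil (a + 1) (a + 1) le_rfl, insRange_nil (b + 1) (b + 1) le_rfl,
      show a - 1 + 1 = a by omega, show b - 1 + 1 = b by omega]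
    simp
  | cons p rest ih =>
    intro oi nj
    obtain ⟨c, d⟩ := p
    simp only [List.cons_append, emitAux]
    rw [ih]
    simp

theorem emit_ins (bi bj : Nat) (hb : 1 ≤ bj) :
    ∀ (ms : List (Nat × Nat)) (oi nj : Nat), lastNj nj ms ≤ bj →
    emitAux bi bj ms oi nj = emitAux bi (bj - 1) ms oi nj ++ [(-1, (bj : Int))] := by
  intro ms
  induction ms with
  | nil =>
    intro oi nj h
    simp only [emitAux, lastNj] at *
    rw [show bj - 1 + 1 = bj by omega, insRange_concat nj bj (by simpa [lastNj] using h)]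
    simp
  | cons p rest ih =>
    intro oi nj h
    obtain ⟨c, d⟩ := p
    simp only [emitAux]
    rw [ih (c + 1) (d + 1) (by simpa [lastNj] using h)]
    simp

theorem emit_del (bi bj : Nat) (hb : 1 ≤ bi) :
    ∀ (ms : List (Nat × Nat)) (oi nj : Nat), lastOi oi ms ≤ bi → bj < lastNj nj ms →
    emitAux bi bj ms oi nj = emitAux (bi - 1) bj ms oi nj ++ [((bi : Int), -1)] := by
  intro ms
  induction ms with
  | nil =>
    intro oi nj h1 h2
    simp only [lastOi, lastNj] at h1 h2
    simp only [emitAux]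
    rw [show bi - 1 + 1 = bi by omega, delRange_concat oi bi h1,
      insRange_nil nj (bj + 1) (by omega)]
    simp
  | cons p rest ih =>
    intro oi nj h1 h2
    obtain ⟨c, d⟩ := p
    simp only [emitAux]
    rw [ih (c + 1) (d + 1) (by simpa [lastOi] using h1) (by simpa [lastNj] using h2)]
    simp

theorem main_lemma (os ns : List String) : ∀ (k i j : Nat), i + j ≤ k →
    i ≤ os.length → j ≤ ns.length →
    convert ((backA os ns (lcsTable os ns) k i j).reverse) =
      emitAux i j ((backB os ns (lcsTable os ns) k i j).reverse) 1 1 := by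
  intro k
  induction k with
  | zero =>
    intro i j hk hi hj
    have hi0 : i = 0 := by omega
    have hj0 : j = 0 := by omega
    subst hi0; subst hj0
    simp [backA, backB, convert, emitAux, delRange_nil 1 1 le_rfl, insRange_nil 1 1 le_rfl]
  | succ k ih =>
    intro i j hk hi hj
    rw [backA, backB]
    split_ifs with h0 h1 h2
    · simp [convert, emitAux, delRange_nil, insRange_nil, h0.1, h0.2]
    · -- match step
      have hij : i ≠ 0 ∧ j ≠ 0 := by
        simp only [matchC, Bool.and_eq_true, bne_iff_ne, ne_eq] at h1
        exact ⟨h1.1.1, h1.1.2⟩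
      rw [List.reverse_cons, List.reverse_cons, convert_append,
        emit_match i j (by omega) (by omega),
        ih (i - 1) (j - 1) (by omega) (by omega) (by omega)]
      simp [convert]
    · -- insertion step
      have hj0 : j ≠ 0 := by
        simp only [insC, Bool.and_eq_true, bne_iff_ne, ne_eq] at h2
        exact h2.1
      have hlast : lastNj 1 ((backB os ns (lcsTable os ns) k i (j - 1)).reverse) ≤ j := by
        apply lastNj_le _ 1 j (by omega)
        intro p hp
        have := backB_bounds os ns (lcsTable os ns) k i (j - 1) p (List.mem_reverse.mp hp)
        omega
      rw [List.reverse_cons, convert_append,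
        emit_ins i j (by omega) _ 1 1 hlast,
        ih i (j - 1) (by omega) (by omega) (by omega)]
      simp [convert]
    · -- deletion step
      have hi0 : i ≠ 0 := by
        intro hi0
        have hj0 : j ≠ 0 := fun hj0 => h0 ⟨hi0, hj0⟩
        exact h2 (by simp [insC, hi0, hj0])
      have hlastO : lastOi 1 ((backB os ns (lcsTable os ns) k (i - 1) j).reverse) ≤ i := by
        apply lastOi_le _ 1 i (by omega)
        intro p hp
        have := backB_bounds os ns (lcsTable os ns) k (i - 1) j p (List.mem_reverse.mp hp)
        omega
      have hlastN : j < lastNj 1 ((backB os ns (lcsTable os ns) k (i - 1) j).reverse) := by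
        cases Nat.eq_zero_or_pos j with
        | inl hj0 =>
          subst hj0
          rw [backB_zero]
          simp [lastNj]
        | inr hj1 =>
          obtain ⟨c, rest, hhead⟩ := backB_head_after_del os ns i k j (by omega) hi hj hj1
            (by simpa using h1) (by simpa using h2)
          rw [hhead, List.reverse_cons, lastNj_concat]
          omega
      rw [List.reverse_cons, convert_append,
        emit_del i j (by omega) _ 1 1 hlastO hlastN,
        ih (i - 1) j (by omega) (by omega) (by omega)]
      simp [convert]

-- ===== VERDICT (by name: the statement is the Claim_ definition above) =====
theorem map_lines_spec : Claim_equal_map_lines := by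
  intro os ns _
  unfold Spec_map_lines map_lines map_lines_alt
  exact main_lemma os ns (os.length + ns.length) os.length ns.length le_rfl le_rfl le_rfl
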